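-- pv_equiv track=rewrite | github.com/mnajmisupian/Algorithm-Project | Problem2/problem2.py | posWordsNVal
-- ===== SOURCE A (Python) =====
-- def posWordsNVal(posWordList, wordDic):
--     positiveWord = []
--     positiveWordVal = []
--     positive = 0
--     for i in posWordList:  # count positive word
--         if i in wordDic.keys():
--             positive += int(wordDic.get(i))
--             positiveWord.append(i)
--             positiveWordVal.append(int(wordDic.get(i)))
--     return positiveWord, positiveWordVal, positive
-- ===== SOURCE B (Python) =====
-- def posWordsNVal(posWordList, wordDic):
--     # Divide and conquer over index ranges: solve halves, combine by concatenation.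
--     def solve(lo, hi):
--         if hi - lo == 0:
--             return [], [], 0
--         if hi - lo == 1:
--             w = posWordList[lo]
--             if w in wordDic:
--                 n = int(wordDic[w])
--                 return [w], [n], n
--             return [], [], 0
--         mid = (lo + hi) // 2
--         w1, v1, s1 = solve(lo, mid)
--         w2, v2, s2 = solve(mid, hi)
--         return w1 + w2, v1 + v2, s1 + s2
--     return solve(0, len(posWordList))
-- ===== Notes on version B (the rewrite author's own statement) =====
-- stated objective: alternative
-- what changed: A's single fused left-to-right accumulation loop is replaced by a divide-and-conquer recursion over index ranges: each half is solved independently and the word list, value list and sum are combined by concatenation/addition.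
import Mathlib
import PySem

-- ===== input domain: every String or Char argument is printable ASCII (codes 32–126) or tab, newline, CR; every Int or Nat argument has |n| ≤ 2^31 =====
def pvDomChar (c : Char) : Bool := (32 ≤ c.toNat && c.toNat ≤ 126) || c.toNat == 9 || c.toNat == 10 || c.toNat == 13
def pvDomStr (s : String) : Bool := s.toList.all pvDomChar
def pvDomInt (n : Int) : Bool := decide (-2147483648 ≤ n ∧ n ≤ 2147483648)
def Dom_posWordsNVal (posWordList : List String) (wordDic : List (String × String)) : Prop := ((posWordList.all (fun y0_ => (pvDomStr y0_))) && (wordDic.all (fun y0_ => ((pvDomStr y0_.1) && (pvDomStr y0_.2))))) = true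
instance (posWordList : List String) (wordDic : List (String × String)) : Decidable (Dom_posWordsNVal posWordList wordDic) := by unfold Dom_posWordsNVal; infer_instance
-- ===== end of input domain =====

-- B replaces A's single fused accumulation loop by a divide-and-conquer recursion over index ranges; alternative decomposition, not faster.


-- ===== PORT A =====
-- A's fused loop: one pass, three accumulators (words, values, running sum).
-- int(...) is PySem.Int.ofStr?; Pre_ guarantees it parses wherever A reaches it, so `.getD 0` is never taken there.
def posWordsNVal (posWordList : List String) (wordDic : List (String × String)) : List String × List Int × Int :=
  posWordList.foldl (fun (st : List String × List Int × Int) i =>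
    match wordDic.lookup i with
    | some v =>
        let n := (PySem.Int.ofStr? v).getD 0
        (st.1 ++ [i], st.2.1 ++ [n], st.2.2 + n)
    | none => st) ([], [], 0)

-- ===== PORT B =====
-- B's divide-and-conquer helper solve(lo, hi) over index ranges of posWordList.
def pvSolveB (posWordList : List String) (wordDic : List (String × String)) (lo hi : Nat) :
    List String × List Int × Int :=
  if hi - lo = 0 then ([], [], 0)
  else if hi - lo = 1 then
    match PySem.List.pyGet? posWordList (lo : Int) with
    | some w =>
        match wordDic.lookup w with
        | some v => let n := (PySem.Int.ofStr? v).getD 0; ([w], [n], n)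
        | none => ([], [], 0)
    | none => ([], [], 0)
  else
    let mid := (lo + hi) / 2
    let L := pvSolveB posWordList wordDic lo mid
    let R := pvSolveB posWordList wordDic mid hi
    (L.1 ++ R.1, L.2.1 ++ R.2.1, L.2.2 + R.2.2)
  termination_by hi - lo
  decreasing_by all_goals omega

def posWordsNVal_alt (posWordList : List String) (wordDic : List (String × String)) : List String × List Int × Int :=
  pvSolveB posWordList wordDic 0 posWordList.length

-- ===== PRECONDITION & SPEC =====
-- Pre_ excludes exactly the inputs where Python A raises ValueError: a word of posWordList whose dictionary value is not int-parsable.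
def Pre_posWordsNVal (posWordList : List String) (wordDic : List (String × String)) : Prop :=
  (posWordList.all (fun w => match wordDic.lookup w with
    | some v => (PySem.Int.ofStr? v).isSome
    | none => true)) = true
instance (posWordList : List String) (wordDic : List (String × String)) : Decidable (Pre_posWordsNVal posWordList wordDic) := by unfold Pre_posWordsNVal; infer_instance

def pvWitness_posWordsNVal : List String × (List (String × String)) :=
  (["good", "bad", "nice"], [("good", " 7 "), ("nice", "+2")])

def Spec_posWordsNVal (posWordList : List String) (wordDic : List (String × String)) (out : List String × List Int × Int) : Prop := out = posWordsNVal_alt posWordList wordDic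
instance (posWordList : List String) (wordDic : List (String × String)) (out : List String × List Int × Int) : Decidable (Spec_posWordsNVal posWordList wordDic out) := by unfold Spec_posWordsNVal; infer_instance

-- ===== CLAIM =====
def Claim_equal_posWordsNVal : Prop := ∀ (posWordList : List String) (wordDic : List (String × String)), Dom_posWordsNVal posWordList wordDic → Pre_posWordsNVal posWordList wordDic → Spec_posWordsNVal posWordList wordDic (posWordsNVal posWordList wordDic)

-- ===== LEMMAS AND PROOFS =====

-- canonical form both ports are reduced to: filter / map / sum over a segment
def pvSpec (wordDic : List (String × String)) (l : List String) : List String × List Int × Int :=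
  (l.filter (fun w => (wordDic.lookup w).isSome),
   (l.filter (fun w => (wordDic.lookup w).isSome)).map
      (fun w => ((wordDic.lookup w).bind PySem.Int.ofStr?).getD 0),
   ((l.filter (fun w => (wordDic.lookup w).isSome)).map
      (fun w => ((wordDic.lookup w).bind PySem.Int.ofStr?).getD 0)).sum)

theorem pvSpec_append (wordDic : List (String × String)) (l₁ l₂ : List String) :
    pvSpec wordDic (l₁ ++ l₂) =
      ((pvSpec wordDic l₁).1 ++ (pvSpec wordDic l₂).1,
       (pvSpec wordDic l₁).2.1 ++ (pvSpec wordDic l₂).2.1,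
       (pvSpec wordDic l₁).2.2 + (pvSpec wordDic l₂).2.2) := by
  simp [pvSpec, List.filter_append]

-- the segment of posWordList between indices lo and hi
def pvSeg (xs : List String) (lo hi : Nat) : List String := (xs.drop lo).take (hi - lo)

theorem pvSeg_split (xs : List String) (lo mid hi : Nat) (h1 : lo ≤ mid) (h2 : mid ≤ hi) :
    pvSeg xs lo hi = pvSeg xs lo mid ++ pvSeg xs mid hi := by
  unfold pvSeg
  have h : hi - lo = (mid - lo) + (hi - mid) := by omega
  have h' : lo + (mid - lo) = mid := by omega
  rw [h, List.take_add, List.drop_drop, h']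

theorem pvSeg_single (xs : List String) (lo : Nat) (h : lo < xs.length) :
    pvSeg xs lo (lo + 1) = [xs[lo]] := by
  unfold pvSeg
  have h1 : lo + 1 - lo = 1 := by omega
  rw [h1, List.drop_eq_getElem_cons h, List.take_succ_cons, List.take_zero]

-- B's divide and conquer computes pvSpec of the segment
theorem pvSolveB_eq_spec (xs : List String) (d : List (String × String)) (lo hi : Nat)
    (hhi : hi ≤ xs.length) : pvSolveB xs d lo hi = pvSpec d (pvSeg xs lo hi) := by
  by_cases h0 : hi - lo = 0
  · rw [pvSolveB, if_pos h0]
    simp [pvSeg, h0, pvSpec]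
  · by_cases h1 : hi - lo = 1
    · have hlo : lo < xs.length := by omega
      have hhi' : hi = lo + 1 := by omega
      rw [pvSolveB, if_neg h0, if_pos h1]
      have hget : PySem.List.pyGet? xs (lo : Int) = some xs[lo] := by
        rw [PySem.List.pyGet?_natCast]
        simp [List.getElem?_eq_getElem hlo]
      rw [hget, hhi', pvSeg_single xs lo hlo]
      cases hl : d.lookup xs[lo] with
      | none => simp [pvSpec, hl]
      | some v => simp [pvSpec, hl]
    · rw [pvSolveB]
      rw [if_neg h0, if_neg h1]
      have hmid1 : lo ≤ (lo + hi) / 2 := by omega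
      have hmid2 : (lo + hi) / 2 ≤ hi := by omega
      simp only [pvSolveB_eq_spec xs d lo ((lo + hi) / 2) (le_trans hmid2 hhi),
        pvSolveB_eq_spec xs d ((lo + hi) / 2) hi hhi,
        pvSeg_split xs lo ((lo + hi) / 2) hi hmid1 hmid2, pvSpec_append]
  termination_by hi - lo
  decreasing_by all_goals omega

-- A's fold, started from st, appends/adds pvSpec's components onto st
theorem posWordsNVal_fold_eq (posWordList : List String) (wordDic : List (String × String))
    (st : List String × List Int × Int) :
    posWordList.foldl (fun (st : List String × List Int × Int) i =>
      match wordDic.lookup i with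
      | some v =>
          let n := (PySem.Int.ofStr? v).getD 0
          (st.1 ++ [i], st.2.1 ++ [n], st.2.2 + n)
      | none => st) st
    = (st.1 ++ (pvSpec wordDic posWordList).1,
       st.2.1 ++ (pvSpec wordDic posWordList).2.1,
       st.2.2 + (pvSpec wordDic posWordList).2.2) := by
  induction posWordList generalizing st with
  | nil => simp [pvSpec]
  | cons x xs ih =>
    cases hx : wordDic.lookup x with
    | none =>
      simp only [List.foldl_cons, hx, ih]
      simp [pvSpec, hx]
    | some v =>
      simp only [List.foldl_cons, hx, ih]
      simp [pvSpec, hx, List.append_assoc, add_assoc]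

-- ===== VERDICT =====
theorem posWordsNVal_spec : Claim_equal_posWordsNVal := by
  intro posWordList wordDic _ _
  unfold Spec_posWordsNVal posWordsNVal posWordsNVal_alt
  rw [posWordsNVal_fold_eq posWordList wordDic ([], [], 0),
    pvSolveB_eq_spec posWordList wordDic 0 posWordList.length le_rfl]
  have : pvSeg posWordList 0 posWordList.length = posWordList := by simp [pvSeg]
  rw [this]
  simp
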